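-- pv_equiv track=rewrite | github.com/Sharan25599/PythonAssignments | pythonProject/src/NoIdea/util.py | calculate_happiness
-- ===== SOURCE A (Python) =====
-- def calculate_happiness(n, m, arr, set_A, set_B):
--     happiness = 0
--     for num in arr:
--         if num in set_A:
--             happiness += 1
--         elif num in set_B:
--             happiness -= 1
--     return happiness
-- ===== SOURCE B (Python) =====
-- def calculate_happiness(n, m, arr, set_A, set_B):
--     # Count multiplicities of arr once, then score by iterating over the SETS:
--     # every distinct element of set_A contributes +count, every distinct
--     # element of set_B that is not in set_A contributes -count.
--     cnt = {}
--     for num in arr: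
--         cnt[num] = cnt.get(num, 0) + 1
--     A = set(set_A)
--     B_only = set(set_B) - A
--     return sum(cnt.get(x, 0) for x in A) - sum(cnt.get(x, 0) for x in B_only)
-- ===== Notes on version B (the rewrite author's own statement) =====
-- stated objective: alternative
-- what changed: Instead of scanning arr and branching per element, B builds a multiplicity counter of arr once and then iterates over the deduplicated sets: happiness = sum of counts over set(set_A) minus sum of counts over set(set_B)-set(set_A) (the set difference encodes A's elif priority).
import Mathlib
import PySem

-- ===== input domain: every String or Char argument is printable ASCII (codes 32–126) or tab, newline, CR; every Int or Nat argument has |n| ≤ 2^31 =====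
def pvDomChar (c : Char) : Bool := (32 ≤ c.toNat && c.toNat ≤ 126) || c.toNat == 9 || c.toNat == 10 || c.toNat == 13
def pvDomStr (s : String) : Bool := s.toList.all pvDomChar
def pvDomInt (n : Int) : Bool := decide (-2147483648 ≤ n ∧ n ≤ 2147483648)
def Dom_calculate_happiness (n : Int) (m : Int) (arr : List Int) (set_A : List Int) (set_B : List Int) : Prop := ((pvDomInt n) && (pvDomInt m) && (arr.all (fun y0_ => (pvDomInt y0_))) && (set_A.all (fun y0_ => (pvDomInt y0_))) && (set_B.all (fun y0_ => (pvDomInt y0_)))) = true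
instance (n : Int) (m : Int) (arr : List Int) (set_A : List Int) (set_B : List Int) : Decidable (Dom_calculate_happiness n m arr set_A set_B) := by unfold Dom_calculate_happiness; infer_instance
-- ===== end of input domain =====

-- B counts arr's multiplicities once and scores by iterating over the deduplicated
-- sets (sum of counts over set(set_A) minus over set(set_B)-set(set_A)) instead of
-- branching per element of arr (objective: alternative).


-- ===== PORT A =====
def calculate_happiness (n : Int) (m : Int) (arr : List Int) (set_A : List Int) (set_B : List Int) : Int :=
  arr.foldl (fun happiness num =>
    if set_A.contains num then happiness + 1
    else if set_B.contains num then happiness - 1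
    else happiness) 0

-- ===== PORT B =====
def calculate_happiness_alt (n : Int) (m : Int) (arr : List Int) (set_A : List Int) (set_B : List Int) : Int :=
  let cnt : PySem.Dict Int Int :=
    arr.foldl (fun d num => d.insert num (d.getD num 0 + 1)) PySem.Dict.empty
  let A : PySem.Set Int := PySem.Set.ofList set_A
  let B_only : PySem.Set Int := PySem.Set.diff (PySem.Set.ofList set_B) A
  (A.map (fun x => cnt.getD x 0)).sum - (B_only.map (fun x => cnt.getD x 0)).sum

-- ===== PRECONDITION & SPEC =====
def Spec_calculate_happiness (n : Int) (m : Int) (arr : List Int) (set_A : List Int) (set_B : List Int) (out : Int) : Prop := out = calculate_happiness_alt n m arr set_A set_B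
instance (n : Int) (m : Int) (arr : List Int) (set_A : List Int) (set_B : List Int) (out : Int) : Decidable (Spec_calculate_happiness n m arr set_A set_B out) := by unfold Spec_calculate_happiness; infer_instance

-- ===== CLAIM (what is proved, stated in full; the proofs are below) =====
def Claim_equal_calculate_happiness : Prop := ∀ (n : Int) (m : Int) (arr : List Int) (set_A : List Int) (set_B : List Int), Dom_calculate_happiness n m arr set_A set_B → Spec_calculate_happiness n m arr set_A set_B (calculate_happiness n m arr set_A set_B)

-- ===== LEMMAS AND PROOFS =====

-- A 0/1-indicator summed over a duplicate-free list is a membership test.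
theorem sum_indicator (S : List Int) (a : Int) (hS : S.Nodup) :
    (S.map (fun x => if x = a then (1 : Int) else 0)).sum = if a ∈ S then 1 else 0 := by
  induction S with
  | nil => simp
  | cons s S' ih =>
    rcases List.nodup_cons.mp hS with ⟨hsn, hS'⟩
    simp only [List.map_cons, List.sum_cons, List.mem_cons, ih hS']
    by_cases h : a = s
    · subst h; simp [hsn]
    · simp [h, Ne.symm h]

-- Summing arr's multiplicities over a duplicate-free list S counts the elements of
-- arr that lie in S.
theorem sum_count_nodup (S arr : List Int) (hS : S.Nodup) :
    (S.map (fun x => (arr.count x : Int))).sum = (arr.countP (fun y => S.contains y) : Int) := by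
  induction arr with
  | nil => simp
  | cons a t ih =>
    calc (S.map (fun x => ((a :: t).count x : Int))).sum
        = (S.map (fun x => (t.count x : Int) + if x = a then 1 else 0)).sum := by
          congr 1; apply List.map_congr_left; intro x _
          rw [List.count_cons]
          by_cases h : x = a
          · simp [h]
          · simp [h, Ne.symm h]
      _ = (S.map (fun x => (t.count x : Int))).sum
          + (S.map (fun x => if x = a then (1 : Int) else 0)).sum := by
          rw [← List.sum_map_add]
      _ = (((a :: t).countP (fun y => S.contains y) : Nat) : Int) := by
          rw [ih, sum_indicator S a hS, List.countP_cons]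
          by_cases h : a ∈ S <;> simp [h]

-- A's fold equals the accumulator plus (#arr-elements in set_A) − (#arr-elements in set_B \ set_A).
theorem foldA_eq (arr set_A set_B : List Int) (acc : Int) :
    arr.foldl (fun happiness num =>
      if set_A.contains num then happiness + 1
      else if set_B.contains num then happiness - 1
      else happiness) acc
    = acc + (arr.countP (fun y => set_A.contains y) : Int)
          - (arr.countP (fun y => set_B.contains y && !set_A.contains y) : Int) := by
  induction arr generalizing acc with
  | nil => simp
  | cons a t ih =>
    simp only [List.foldl_cons, List.countP_cons, ih]
    by_cases hA : a ∈ set_A <;> by_cases hB : a ∈ set_B <;>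
      simp [hA, hB] <;> push_cast <;> omega

theorem countP_congr' (arr : List Int) (p q : Int → Bool) (h : ∀ x, p x = q x) :
    arr.countP p = arr.countP q := by
  apply List.countP_congr; intro x _; simp [h x]

-- ===== VERDICT (by name: the statement is the Claim_ definition above) =====
theorem calculate_happiness_spec : Claim_equal_calculate_happiness := by
  intro n m arr set_A set_B _
  unfold Spec_calculate_happiness calculate_happiness calculate_happiness_alt
  rw [foldA_eq]
  simp only [PySem.Dict.foldl_insert_getD_add_one_eq_counter, PySem.Dict.getD_counter]
  rw [sum_count_nodup _ arr (PySem.Set.nodup_ofList set_A),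
      sum_count_nodup _ arr
        (show ((PySem.Set.ofList set_B).diff (PySem.Set.ofList set_A)).Nodup from
          List.Nodup.filter _ (PySem.Set.nodup_ofList set_B))]
  have e1 : ∀ y : Int, List.contains (PySem.Set.ofList set_A) y = set_A.contains y := by
    intro y; rw [Bool.eq_iff_iff]; simp [PySem.Set.mem_ofList]
  have e2 : ∀ y : Int,
      List.contains ((PySem.Set.ofList set_B).diff (PySem.Set.ofList set_A)) y
        = (set_B.contains y && !set_A.contains y) := by
    intro y; rw [Bool.eq_iff_iff]
    simp [PySem.Set.mem_diff, PySem.Set.mem_ofList]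
  rw [countP_congr' arr (fun y => List.contains (PySem.Set.ofList set_A) y)
        (fun y => set_A.contains y) e1,
      countP_congr' arr
        (fun y => List.contains ((PySem.Set.ofList set_B).diff (PySem.Set.ofList set_A)) y)
        (fun y => set_B.contains y && !set_A.contains y) e2]
  omega
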